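-- pv_equiv track=rewrite | github.com/SurajBhari/clip_nightbot | main.py | parse_user_badges
-- ===== SOURCE A (Python) =====
-- def parse_user_badges(badges) -> str:
--     """owner - Channel Owner
--     moderator - Channel Moderator
--     subscriber - Paid Channel Subscriber
--     everyone"""
--     badges = [x["title"].split(" ")[0].lower() for x in badges]
--     if "owner" in badges:
--         return "owner"
--     if "moderator" in badges:
--         return "moderator"
--     if "member" in badges:
--         return "subscriber"
--     return "everyone"
-- ===== SOURCE B (Python) =====
-- def parse_user_badges(badges) -> str:
--     """owner - Channel Owner
--     moderator - Channel Moderator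
--     subscriber - Paid Channel Subscriber
--     everyone"""
--     ranks = {"owner": 0, "moderator": 1, "member": 2}
--     best = 3
--     for x in badges:
--         r = ranks.get(x["title"].split(" ")[0].lower(), 3)
--         if r < best:
--             best = r
--     return ["owner", "moderator", "subscriber", "everyone"][best]
-- ===== Notes on version B (the rewrite author's own statement) =====
-- stated objective: alternative
-- what changed: replaces build-a-word-list-plus-three-membership-scans with a single min-rank-tracking pass over the badges and a final table lookup
import Mathlib
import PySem

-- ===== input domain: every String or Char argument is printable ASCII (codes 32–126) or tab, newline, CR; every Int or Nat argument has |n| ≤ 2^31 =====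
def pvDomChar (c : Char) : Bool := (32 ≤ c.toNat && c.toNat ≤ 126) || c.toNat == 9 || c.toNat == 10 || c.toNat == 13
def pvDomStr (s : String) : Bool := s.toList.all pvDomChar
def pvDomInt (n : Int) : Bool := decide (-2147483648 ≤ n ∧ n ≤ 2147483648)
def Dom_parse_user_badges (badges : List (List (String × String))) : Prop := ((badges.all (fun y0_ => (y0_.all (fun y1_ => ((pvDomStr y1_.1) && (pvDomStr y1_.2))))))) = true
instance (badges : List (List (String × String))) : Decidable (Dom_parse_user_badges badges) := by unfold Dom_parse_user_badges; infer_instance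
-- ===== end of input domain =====

-- B replaces A's build-word-list-plus-three-membership-scans by a single min-rank-tracking
-- pass with a final table lookup (alternative decomposition, same cost).


-- ===== PORT A =====
-- x["title"].split(" ")[0].lower()  (first-match assoc lookup; Pre_ guarantees the key exists)
def aWord (x : List (String × String)) : String :=
  PySem.Str.lower (((PySem.Str.split? (((x.find? (fun p => p.1 == "title")).map Prod.snd).getD "") " ").getD []).headD "")

def parse_user_badges (badges : List (List (String × String))) : String :=
  let bs := badges.map aWord
  if bs.contains "owner" then "owner"
  else if bs.contains "moderator" then "moderator"
  else if bs.contains "member" then "subscriber"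
  else "everyone"

-- ===== PORT B =====
def bWord (x : List (String × String)) : String :=
  PySem.Str.lower (((PySem.Str.split? (((x.find? (fun p => p.1 == "title")).map Prod.snd).getD "") " ").getD []).headD "")

-- ranks.get(w, 3)
def bRank (w : String) : Int :=
  PySem.Dict.getD (PySem.Dict.ofList [("owner", (0:Int)), ("moderator", 1), ("member", 2)]) w 3

def parse_user_badges_alt (badges : List (List (String × String))) : String :=
  let best := badges.foldl (fun best x =>
    let r := bRank (bWord x); if r < best then r else best) 3
  (PySem.List.pyGet? ["owner", "moderator", "subscriber", "everyone"] best).getD ""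

-- ===== PRECONDITION & SPEC =====
-- A raises KeyError (and so does B) when some badge lacks the "title" key; exactly those inputs are excluded.
def Pre_parse_user_badges (badges : List (List (String × String))) : Prop :=
  (badges.all (fun x => x.any (fun p => p.1 == "title"))) = true
instance (badges : List (List (String × String))) : Decidable (Pre_parse_user_badges badges) := by unfold Pre_parse_user_badges; infer_instance

def pvWitness_parse_user_badges : (List (List (String × String))) := [[("title", "Owner")], [("title", "member x")]]

def Spec_parse_user_badges (badges : List (List (String × String))) (out : String) : Prop := out = parse_user_badges_alt badges
instance (badges : List (List (String × String))) (out : String) : Decidable (Spec_parse_user_badges badges out) := by unfold Spec_parse_user_badges; infer_instance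

-- ===== CLAIM (what is proved, stated in full; the proofs are below) =====
def Claim_equal_parse_user_badges : Prop := ∀ (badges : List (List (String × String))), Dom_parse_user_badges badges → Pre_parse_user_badges badges → Spec_parse_user_badges badges (parse_user_badges badges)

-- ===== LEMMAS AND PROOFS =====

-- A's rank of a word list: position of the first if-branch that fires.
def aRank (ws : List String) : Int :=
  if ws.contains "owner" then 0
  else if ws.contains "moderator" then 1
  else if ws.contains "member" then 2
  else 3

theorem bRank_eq (w : String) :
    bRank w = if w = "owner" then 0 else if w = "moderator" then 1 else if w = "member" then 2 else 3 := by
  by_cases h1 : w = "owner"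
  · subst h1; decide
  by_cases h2 : w = "moderator"
  · subst h2; decide
  by_cases h3 : w = "member"
  · subst h3; decide
  rw [if_neg h1, if_neg h2, if_neg h3]
  have hof : PySem.Dict.ofList [("owner", (0:Int)), ("moderator", 1), ("member", 2)]
      = PySem.Dict.mk [("owner", (0:Int)), ("moderator", 1), ("member", 2)] := by decide
  unfold bRank
  rw [hof]
  simp only [PySem.Dict.getD, PySem.Dict.get?_mk_cons, beq_iff_eq]
  rw [if_neg (Ne.symm h1), if_neg (Ne.symm h2), if_neg (Ne.symm h3)]
  rfl

theorem bRank_le (w : String) : bRank w ≤ 3 := by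
  rw [bRank_eq]; split_ifs <;> omega

theorem aRank_cons (w : String) (ws : List String) :
    aRank (w :: ws) = min (bRank w) (aRank ws) := by
  rw [bRank_eq]
  by_cases h1 : w = "owner" <;> by_cases h2 : w = "moderator" <;> by_cases h3 : w = "member" <;>
    simp [aRank, h1, h2, h3] <;> split_ifs <;> simp_all

theorem fold_min (badges : List (List (String × String))) (b : Int) (hb : b ≤ 3) :
    badges.foldl (fun best x => let r := bRank (bWord x); if r < best then r else best) b
      = min b (aRank (badges.map aWord)) := by
  induction badges generalizing b with
  | nil => simp only [List.foldl_nil, List.map_nil, aRank, List.contains_nil]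
           simp; omega
  | cons x xs ih =>
    simp only [List.foldl_cons, List.map_cons, aRank_cons]
    have hw : bWord x = aWord x := rfl
    have hle : (if bRank (bWord x) < b then bRank (bWord x) else b) ≤ 3 := by
      have := bRank_le (bWord x); split_ifs <;> omega
    rw [ih _ hle, hw]
    have := bRank_le (aWord x)
    split_ifs with h <;> omega

theorem aRank_le (ws : List String) : aRank ws ≤ 3 := by
  unfold aRank; split_ifs <;> omega

-- ===== VERDICT (by name: the statement is the Claim_ definition above) =====
theorem parse_user_badges_spec : Claim_equal_parse_user_badges := by
  intro badges _ _
  unfold Spec_parse_user_badges parse_user_badges parse_user_badges_alt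
  rw [fold_min _ _ (by omega)]
  have hmin : min 3 (aRank (badges.map aWord)) = aRank (badges.map aWord) := by
    have := aRank_le (badges.map aWord); omega
  rw [hmin]
  set ws := badges.map aWord
  by_cases h1 : "owner" ∈ ws <;> by_cases h2 : "moderator" ∈ ws <;>
    by_cases h3 : "member" ∈ ws <;>
    simp [aRank, h1, h2, h3, PySem.List.pyGet?, PySem.List.pyIdx?]
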